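-- pv_equiv track=rewrite | github.com/patrikpukan/hackthelaw | app/core/ingest/processors.py | _extract_themes_from_chunks
-- ===== SOURCE A (Python) =====
-- from typing import Dict, Any, List
--
-- def _extract_themes_from_chunks(chunks: List[Dict]) -> List[str]:
--     """Extract main themes from document chunks."""
--
--     theme_keywords = {
--         'employment': ['employee', 'employer', 'work', 'job', 'position'],
--         'financial': ['payment', 'salary', 'compensation', 'money', 'fee'],
--         'legal_compliance': ['law', 'regulation', 'compliance', 'legal'],
--         'confidentiality': ['confidential', 'secret', 'proprietary', 'disclosure'],
--         'termination': ['terminate', 'end', 'expire', 'breach'],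
--         'intellectual_property': ['patent', 'copyright', 'trademark', 'ip']
--     }
--
--     themes = []
--     all_text = ' '.join([chunk.get('text', '') for chunk in chunks]).lower()
--
--     for theme, keywords in theme_keywords.items():
--         if any(keyword in all_text for keyword in keywords):
--             themes.append(theme)
--
--     return themes
-- ===== SOURCE B (Python) =====
-- from typing import Dict, Any, List
--
-- def _extract_themes_from_chunks(chunks: List[Dict]) -> List[str]:
--     """Extract main themes from document chunks (single pass over chunks, found-set)."""
--
--     theme_keywords = {
--         'employment': ['employee', 'employer', 'work', 'job', 'position'],
--         'financial': ['payment', 'salary', 'compensation', 'money', 'fee'],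
--         'legal_compliance': ['law', 'regulation', 'compliance', 'legal'],
--         'confidentiality': ['confidential', 'secret', 'proprietary', 'disclosure'],
--         'termination': ['terminate', 'end', 'expire', 'breach'],
--         'intellectual_property': ['patent', 'copyright', 'trademark', 'ip']
--     }
--
--     found = set()
--     for chunk in chunks:
--         chunk_text = chunk.get('text', '').lower()
--         for theme, keywords in theme_keywords.items():
--             if theme not in found and any(kw in chunk_text for kw in keywords):
--                 found.add(theme)
--
--     return [theme for theme in theme_keywords if theme in found]
-- ===== Notes on version B (the rewrite author's own statement) =====
-- stated objective: alternative
-- what changed: Instead of concatenating every chunk's text into one big lowercased string and then scanning it per theme, B makes a single pass over the chunks, lowercasing each chunk's text on its own and maintaining a set of already-found themes (skipping their keyword tests), and finally rebuilds the result in theme-dict order; no keyword contains a space, so per-chunk matching equals matching against the space-joined text.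
import Mathlib
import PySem

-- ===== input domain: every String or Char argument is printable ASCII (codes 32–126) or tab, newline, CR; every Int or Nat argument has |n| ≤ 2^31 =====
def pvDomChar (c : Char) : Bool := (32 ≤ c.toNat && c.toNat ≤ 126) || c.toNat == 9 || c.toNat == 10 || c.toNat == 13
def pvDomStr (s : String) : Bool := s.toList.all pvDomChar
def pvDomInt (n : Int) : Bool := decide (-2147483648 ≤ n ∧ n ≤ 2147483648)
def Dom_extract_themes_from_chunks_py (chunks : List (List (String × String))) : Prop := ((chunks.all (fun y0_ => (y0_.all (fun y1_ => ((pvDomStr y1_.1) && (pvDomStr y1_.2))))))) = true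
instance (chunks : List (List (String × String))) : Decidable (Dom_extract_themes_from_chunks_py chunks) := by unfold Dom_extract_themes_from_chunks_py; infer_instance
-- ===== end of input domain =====

-- B re-implements theme detection as a single pass over the chunks with a found-set (per-chunk
-- lowercased text) instead of A's scan of one big space-joined lowercased string; same results,
-- no speed claim. Proved equal on all inputs (both functions are total).

-- the theme_keywords dict literal, shared by both Pythons
def pvThemeTable : List (String × List String) :=
  [("employment", ["employee", "employer", "work", "job", "position"]),
   ("financial", ["payment", "salary", "compensation", "money", "fee"]),
   ("legal_compliance", ["law", "regulation", "compliance", "legal"]),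
   ("confidentiality", ["confidential", "secret", "proprietary", "disclosure"]),
   ("termination", ["terminate", "end", "expire", "breach"]),
   ("intellectual_property", ["patent", "copyright", "trademark", "ip"])]

-- chunk.get('text', '')
def pvGetText (chunk : List (String × String)) : String :=
  PySem.Dict.getD (PySem.Dict.mk chunk) "text" ""

-- ===== PORT A =====
def extract_themes_from_chunks_py (chunks : List (List (String × String))) : List String :=
  let all_text := PySem.Str.lower (PySem.Str.join " " (chunks.map (fun chunk => pvGetText chunk)))
  pvThemeTable.foldl
    (fun themes p =>
      if p.2.any (fun kw => PySem.Str.isIn kw all_text) then themes ++ [p.1] else themes) []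

-- ===== PORT B =====
-- body of B's outer loop: one chunk updates the found-set
def pvMarkChunk (found : PySem.Set String) (chunk : List (String × String)) : PySem.Set String :=
  let chunk_text := PySem.Str.lower (pvGetText chunk)
  pvThemeTable.foldl
    (fun f p =>
      if !(PySem.Set.contains f p.1) && p.2.any (fun kw => PySem.Str.isIn kw chunk_text)
      then PySem.Set.add f p.1 else f) found

def extract_themes_from_chunks_py_alt (chunks : List (List (String × String))) : List String :=
  let found := chunks.foldl pvMarkChunk PySem.Set.empty
  (pvThemeTable.map Prod.fst).filter (fun th => PySem.Set.contains found th)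

-- ===== PRECONDITION & SPEC =====
def Spec_extract_themes_from_chunks_py (chunks : List (List (String × String))) (out : List String) : Prop := out = extract_themes_from_chunks_py_alt chunks
instance (chunks : List (List (String × String))) (out : List String) : Decidable (Spec_extract_themes_from_chunks_py chunks out) := by unfold Spec_extract_themes_from_chunks_py; infer_instance

-- ===== CLAIM (what is proved, stated in full; the proofs are below) =====
def Claim_equal_extract_themes_from_chunks_py : Prop := ∀ (chunks : List (List (String × String))), Dom_extract_themes_from_chunks_py chunks → Spec_extract_themes_from_chunks_py chunks (extract_themes_from_chunks_py chunks)

-- ===== LEMMAS AND PROOFS =====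

-- a keyword that does not contain c sits entirely left or entirely right of an occurrence of c
theorem pv_infix_split (kw a b : List Char) (c : Char) (hc : c ∉ kw) :
    kw <:+: (a ++ c :: b) ↔ kw <:+: a ∨ kw <:+: b := by
  constructor
  · rintro ⟨s, t, h⟩
    rcases Nat.lt_or_ge a.length s.length with hlt | hle
    · right
      have hsuf : kw ++ t <:+ a ++ c :: b := ⟨s, by simpa [List.append_assoc] using h⟩
      have hsufb : b <:+ a ++ c :: b := ((List.suffix_cons c b).trans (List.suffix_append a _))
      have hlen : (kw ++ t).length ≤ b.length := by
        have := congrArg List.length h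
        simp [List.length_append] at this ⊢
        omega
      exact (List.prefix_append kw t).isInfix.trans
        (List.suffix_of_suffix_length_le hsuf hsufb hlen).isInfix
    · rcases Nat.lt_or_ge a.length (s.length + kw.length) with hlt2 | hle2
      · exfalso
        apply hc
        have hidx : a.length - s.length < kw.length := by omega
        have h1 : (s ++ (kw ++ t))[a.length]'(by simp [List.length_append]; omega)
            = kw[a.length - s.length]'hidx := by
          rw [List.getElem_append_right (by omega)]
          rw [List.getElem_append_left hidx]
        have h2 : (a ++ c :: b)[a.length]'(by simp) = c := by
          rw [List.getElem_append_right (le_refl _)]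
          simp
        have h' : s ++ (kw ++ t) = a ++ c :: b := by simpa [List.append_assoc] using h
        have e := List.getElem_of_eq h' (i := a.length) (by simp [List.length_append]; omega)
        have h3 : kw[a.length - s.length]'hidx = c := by rw [← h1, e, h2]
        exact h3 ▸ List.getElem_mem hidx
      · left
        have hpre : s ++ kw <+: a ++ c :: b := ⟨t, by simpa [List.append_assoc] using h⟩
        have hprea : a <+: a ++ c :: b := List.prefix_append a _
        have : s ++ kw <+: a := List.prefix_of_prefix_length_le hpre hprea (by simp; omega)
        exact ((List.suffix_append s kw).isInfix.trans this.isInfix)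
  · rintro (h | h)
    · exact h.trans (List.prefix_append a _).isInfix
    · exact h.trans (((List.suffix_cons c b).trans (List.suffix_append a _)).isInfix)

theorem pv_join_cons2 (x y : List Char) (r : List (List Char)) :
    PySem.Chars.join [' '] (x :: y :: r) = x ++ ' ' :: PySem.Chars.join [' '] (y :: r) := by
  simp [PySem.Chars.join, List.intercalate]

theorem pv_lower_join (ls : List (List Char)) :
    PySem.Chars.lower (PySem.Chars.join [' '] ls) =
      PySem.Chars.join [' '] (ls.map PySem.Chars.lower) := by
  induction ls with
  | nil => rfl
  | cons x r ih =>
    cases r with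
    | nil => simp [PySem.Chars.join, List.intercalate, PySem.Chars.lower]
    | cons y s =>
      simp only [List.map_cons] at ih ⊢
      rw [pv_join_cons2, pv_join_cons2]
      simp [PySem.Chars.lower] at ih ⊢
      refine ⟨by decide, ih⟩

theorem pv_infix_join (kw : List Char) (hne : kw ≠ []) (hsp : ' ' ∉ kw) (ls : List (List Char)) :
    (kw <:+: PySem.Chars.join [' '] ls) ↔ ∃ l ∈ ls, kw <:+: l := by
  induction ls with
  | nil =>
    simp [PySem.Chars.join, List.intercalate]
    intro h
    exact hne h
  | cons x r ih =>
    cases r with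
    | nil => simp [PySem.Chars.join, List.intercalate]
    | cons y s =>
      rw [pv_join_cons2, pv_infix_split kw _ _ _ hsp]
      simp only [List.mem_cons] at ih ⊢
      constructor
      · rintro (h | h)
        · exact ⟨x, Or.inl rfl, h⟩
        · obtain ⟨l, hl, hk⟩ := ih.mp h
          exact ⟨l, Or.inr hl, hk⟩
      · rintro ⟨l, (rfl | hl), hk⟩
        · exact Or.inl hk
        · exact Or.inr (ih.mpr ⟨l, hl, hk⟩)

-- every keyword in the table is nonempty and space-free
theorem pv_table_kw : ∀ p ∈ pvThemeTable, ∀ kw ∈ p.2, kw.toList ≠ [] ∧ ' ' ∉ kw.toList := by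
  decide

-- table keys are distinct
theorem pv_key_inj : ∀ p ∈ pvThemeTable, ∀ q ∈ pvThemeTable, q.1 = p.1 → q = p := by decide

-- a theme matches the space-joined lowered text iff it matches some single lowered text
theorem pv_any_isIn_join (kws : List String)
    (hk : ∀ kw ∈ kws, kw.toList ≠ [] ∧ ' ' ∉ kw.toList) (texts : List String) :
    (kws.any (fun kw => PySem.Str.isIn kw (PySem.Str.lower (PySem.Str.join " " texts)))
      = texts.any (fun t => kws.any (fun kw => PySem.Str.isIn kw (PySem.Str.lower t)))) := by
  rw [Bool.eq_iff_iff]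
  simp only [List.any_eq_true, PySem.Str.isIn_iff_infix, PySem.Str.toList_lower,
    PySem.Str.toList_join]
  have hsep : (" " : String).toList = [' '] := rfl
  constructor
  · rintro ⟨kw, hkw, hin⟩
    rw [hsep, pv_lower_join] at hin
    obtain ⟨hne, hsp⟩ := hk kw hkw
    obtain ⟨l, hl, hinf⟩ := (pv_infix_join _ hne hsp _).mp hin
    simp only [List.map_map, List.mem_map, Function.comp] at hl
    obtain ⟨t, ht, rfl⟩ := hl
    exact ⟨t, ht, kw, hkw, hinf⟩
  · rintro ⟨t, ht, kw, hkw, hinf⟩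
    refine ⟨kw, hkw, ?_⟩
    rw [hsep, pv_lower_join]
    obtain ⟨hne, hsp⟩ := hk kw hkw
    refine (pv_infix_join _ hne hsp _).mpr ⟨PySem.Chars.lower t.toList, ?_, hinf⟩
    simp only [List.map_map, List.mem_map, Function.comp]
    exact ⟨t, ht, rfl⟩

-- membership after B's inner loop over the table
theorem pv_mem_inner (tbl : List (String × List String)) (m : String × List String → Bool)
    (f : PySem.Set String) (th : String) :
    (th ∈ tbl.foldl
        (fun f p => if !(PySem.Set.contains f p.1) && m p then PySem.Set.add f p.1 else f) f)
      ↔ th ∈ f ∨ ∃ p ∈ tbl, p.1 = th ∧ m p = true := by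
  induction tbl generalizing f with
  | nil => simp
  | cons p r ih =>
    simp only [List.foldl_cons, List.mem_cons]
    cases hmp : (!(PySem.Set.contains f p.1) && m p) with
    | true =>
      simp only [Bool.and_eq_true, Bool.not_eq_eq_eq_not, Bool.not_true] at hmp
      rw [if_pos rfl, ih]
      simp only [PySem.Set.mem_add]
      constructor
      · rintro (⟨hf | rfl⟩ | ⟨q, hq, hqa, hqm⟩)
        · exact Or.inl hf
        · exact Or.inr ⟨p, Or.inl rfl, rfl, hmp.2⟩
        · exact Or.inr ⟨q, Or.inr hq, hqa, hqm⟩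
      · rintro (hf | ⟨q, (rfl | hq), hqa, hqm⟩)
        · exact Or.inl (Or.inl hf)
        · exact Or.inl (Or.inr hqa.symm)
        · exact Or.inr ⟨q, hq, hqa, hqm⟩
    | false =>
      rw [if_neg Bool.false_ne_true]
      rw [ih]
      simp only [Bool.and_eq_false_iff, Bool.not_eq_eq_eq_not, Bool.not_false] at hmp
      constructor
      · rintro (hf | ⟨q, hq, hqa, hqm⟩)
        · exact Or.inl hf
        · exact Or.inr ⟨q, Or.inr hq, hqa, hqm⟩
      · rintro (hf | ⟨q, (rfl | hq), hqa, hqm⟩)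
        · exact Or.inl hf
        · rcases hmp with hcon | hm
          · exact Or.inl (hqa ▸ (PySem.Set.contains_iff f q.1).mp hcon)
          · exact absurd hqm (by simp [hm])
        · exact Or.inr ⟨q, hq, hqa, hqm⟩

-- membership after B's outer loop over the chunks
theorem pv_mem_outer (chunks : List (List (String × String))) (f : PySem.Set String)
    (th : String) :
    (th ∈ chunks.foldl pvMarkChunk f) ↔
      th ∈ f ∨ ∃ chunk ∈ chunks, ∃ p ∈ pvThemeTable, p.1 = th ∧
        (p.2.any (fun kw => PySem.Str.isIn kw (PySem.Str.lower (pvGetText chunk)))) = true := by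
  induction chunks generalizing f with
  | nil => simp
  | cons chunk r ih =>
    simp only [List.foldl_cons, List.mem_cons]
    rw [ih]
    unfold pvMarkChunk
    rw [pv_mem_inner]
    constructor
    · rintro ((hf | ⟨p, hp, hpa, hpm⟩) | ⟨c, hc, hrest⟩)
      · exact Or.inl hf
      · exact Or.inr ⟨chunk, Or.inl rfl, p, hp, hpa, hpm⟩
      · exact Or.inr ⟨c, Or.inr hc, hrest⟩
    · rintro (hf | ⟨c, (rfl | hc), hrest⟩)
      · exact Or.inl (Or.inl hf)
      · exact Or.inl (Or.inr hrest)
      · exact Or.inr ⟨c, hc, hrest⟩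

-- ===== VERDICT (by name: the statement is the Claim_ definition above) =====
set_option maxHeartbeats 1000000 in
theorem extract_themes_from_chunks_py_spec : Claim_equal_extract_themes_from_chunks_py := by
  unfold Claim_equal_extract_themes_from_chunks_py Spec_extract_themes_from_chunks_py
  intro chunks _
  unfold extract_themes_from_chunks_py extract_themes_from_chunks_py_alt
  rw [PySem.List.foldl_append_if
    (fun p => p.2.any (fun kw => PySem.Str.isIn kw
      (PySem.Str.lower (PySem.Str.join " " (chunks.map (fun chunk => pvGetText chunk))))))
    Prod.fst pvThemeTable []]
  rw [List.filter_map]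
  simp only [List.nil_append]
  congr 1
  apply List.filter_congr
  intro p hp
  rw [Bool.eq_iff_iff, Function.comp]
  rw [Bool.eq_iff_iff.mp (pv_any_isIn_join p.2 (pv_table_kw p hp) _)]
  rw [PySem.Set.contains_iff, pv_mem_outer]
  simp only [PySem.Set.empty, List.not_mem_nil, false_or, List.any_eq_true, List.mem_map]
  constructor
  · rintro ⟨t, ⟨chunk, hc, rfl⟩, hm⟩
    exact ⟨chunk, hc, p, hp, rfl, hm⟩
  · rintro ⟨chunk, hc, q, hq, hqa, hqm⟩
    have := pv_key_inj p hp q hq hqa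
    subst this
    exact ⟨pvGetText chunk, ⟨chunk, hc, rfl⟩, hqm⟩
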